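-- pv_equiv track=rewrite | github.com/Tosaaaki/QuantRabbit | tools/post_close_regret.py | _classify_collapse_component
-- ===== SOURCE A (Python) =====
-- def _classify_collapse_component(reason: str, close_reason: str) -> str:
--     text = " ".join((reason or "", close_reason or "")).lower()
--     if any(token in text for token in ("spread", "slippage", "friction", "too wide")):
--         return "vehicle_friction"
--     if any(token in text for token in ("stale", "zombie", "recycle", "aged", "wish_distance")):
--         return "stale_thesis"
--     if any(token in text for token in ("acceptance_above_entry", "accept", "body break", "structure", "shelf broke")):
--         return "structure_break"
--     if any(
--         token in text
--         for token in (
--             "m1_pulse_flip",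
--             "no_first_confirmation",
--             "no_reclaim",
--             "shelf_fail",
--             "no_rebuy",
--             "failed_break",
--             "failed_floor",
--             "retest",
--             "reclaim",
--         )
--     ):
--         return "trigger_timing_fail"
--     if "stop_loss_order" in text:
--         return "hard_invalidation"
--     if "market_order_trade_close" in text:
--         return "manual_discretionary_cut"
--     return "unknown"
-- ===== SOURCE B (Python) =====
-- # Order-independent classification: instead of testing keyword groups in
-- # priority order with an early return, scan a flat alphabetical token->priority
-- # map once, keep the MINIMUM priority among all matching tokens, and index the
-- # category table with it.  Correct because "first matching group" == "smallest
-- # priority among all matches".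
-- CATEGORIES = (
--     "vehicle_friction",
--     "stale_thesis",
--     "structure_break",
--     "trigger_timing_fail",
--     "hard_invalidation",
--     "manual_discretionary_cut",
--     "unknown",
-- )
--
-- TOKEN_PRIORITY = {
--     "accept": 2,
--     "acceptance_above_entry": 2,
--     "aged": 1,
--     "body break": 2,
--     "failed_break": 3,
--     "failed_floor": 3,
--     "friction": 0,
--     "m1_pulse_flip": 3,
--     "market_order_trade_close": 5,
--     "no_first_confirmation": 3,
--     "no_rebuy": 3,
--     "no_reclaim": 3,
--     "reclaim": 3,
--     "recycle": 1,
--     "retest": 3,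
--     "shelf broke": 2,
--     "shelf_fail": 3,
--     "slippage": 0,
--     "spread": 0,
--     "stale": 1,
--     "stop_loss_order": 4,
--     "structure": 2,
--     "too wide": 0,
--     "wish_distance": 1,
--     "zombie": 1,
-- }
--
--
-- def _classify_collapse_component(reason: str, close_reason: str) -> str:
--     text = " ".join((reason or "", close_reason or "")).lower()
--     best = len(CATEGORIES) - 1
--     for token, prio in TOKEN_PRIORITY.items():
--         if token in text:
--             best = min(best, prio)
--     return CATEGORIES[best]
-- ===== Notes on version B (the rewrite author's own statement) =====
-- stated objective: alternative
-- what changed: Replaced the six priority-ordered early-return keyword branches by an order-independent single fold over a flat alphabetical token-to-priority map that keeps the minimum matching priority and indexes a category table with it.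
import Mathlib
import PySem

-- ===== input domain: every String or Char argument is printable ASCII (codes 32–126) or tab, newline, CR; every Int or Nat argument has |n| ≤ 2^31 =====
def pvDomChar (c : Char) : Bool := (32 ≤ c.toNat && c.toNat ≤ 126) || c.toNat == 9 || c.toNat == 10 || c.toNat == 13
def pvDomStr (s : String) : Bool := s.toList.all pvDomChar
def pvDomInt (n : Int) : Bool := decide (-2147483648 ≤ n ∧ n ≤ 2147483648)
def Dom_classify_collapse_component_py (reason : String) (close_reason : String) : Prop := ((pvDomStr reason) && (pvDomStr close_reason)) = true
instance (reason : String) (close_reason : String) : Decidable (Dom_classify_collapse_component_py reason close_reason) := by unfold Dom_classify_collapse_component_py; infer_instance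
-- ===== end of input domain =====

-- B replaces A's priority-ordered early-return keyword branches by an order-independent
-- minimum-priority fold over a flat alphabetical token->priority table (objective: alternative).


-- ===== PORT A =====
-- literal transliteration of A: ' '.join + .lower once, then six if/return branches in order.
-- '(reason or "")' is ported as 'if reason = "" then "" else reason' (Python string falsiness = emptiness).
def classify_collapse_component_py (reason : String) (close_reason : String) : String :=
  let text := PySem.Str.lower (PySem.Str.join " "
    [(if reason = "" then "" else reason), (if close_reason = "" then "" else close_reason)])
  if (["spread", "slippage", "friction", "too wide"]).any
      (fun token => PySem.Str.isIn token text) then "vehicle_friction"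
  else if (["stale", "zombie", "recycle", "aged", "wish_distance"]).any
      (fun token => PySem.Str.isIn token text) then "stale_thesis"
  else if (["acceptance_above_entry", "accept", "body break", "structure", "shelf broke"]).any
      (fun token => PySem.Str.isIn token text) then "structure_break"
  else if (["m1_pulse_flip", "no_first_confirmation", "no_reclaim", "shelf_fail",
            "no_rebuy", "failed_break", "failed_floor", "retest", "reclaim"]).any
      (fun token => PySem.Str.isIn token text) then "trigger_timing_fail"
  else if PySem.Str.isIn "stop_loss_order" text then "hard_invalidation"
  else if PySem.Str.isIn "market_order_trade_close" text then "manual_discretionary_cut"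
  else "unknown"

-- ===== PORT B =====
-- B's category table (index = priority; last entry = fall-through "unknown").
def pvCategories : List String :=
  ["vehicle_friction", "stale_thesis", "structure_break", "trigger_timing_fail",
   "hard_invalidation", "manual_discretionary_cut", "unknown"]

-- B's flat token -> priority dict, in Source B's (alphabetical) insertion order.
def pvTokenPriority : List (String × Nat) :=
  [("accept", 2), ("acceptance_above_entry", 2), ("aged", 1), ("body break", 2),
   ("failed_break", 3), ("failed_floor", 3), ("friction", 0), ("m1_pulse_flip", 3),
   ("market_order_trade_close", 5), ("no_first_confirmation", 3), ("no_rebuy", 3),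
   ("no_reclaim", 3), ("reclaim", 3), ("recycle", 1), ("retest", 3), ("shelf broke", 2),
   ("shelf_fail", 3), ("slippage", 0), ("spread", 0), ("stale", 1), ("stop_loss_order", 4),
   ("structure", 2), ("too wide", 0), ("wish_distance", 1), ("zombie", 1)]

-- B's loop body ('if token in text: best = min(best, prio)') as a named step function.
def pvStep (text : String) (best : Nat) (p : String × Nat) : Nat :=
  if PySem.Str.isIn p.1 text then min best p.2 else best

-- B's loop: fold keeping the minimum priority among matching tokens.
def classify_collapse_component_py_alt (reason : String) (close_reason : String) : String :=
  let text := PySem.Str.lower (PySem.Str.join " "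
    [(if reason = "" then "" else reason), (if close_reason = "" then "" else close_reason)])
  let best := pvTokenPriority.foldl (pvStep text) (pvCategories.length - 1)
  pvCategories.getD best "unknown"

-- ===== PRECONDITION & SPEC =====
def Spec_classify_collapse_component_py (reason : String) (close_reason : String) (out : String) : Prop := out = classify_collapse_component_py_alt reason close_reason
instance (reason : String) (close_reason : String) (out : String) : Decidable (Spec_classify_collapse_component_py reason close_reason out) := by unfold Spec_classify_collapse_component_py; infer_instance

-- ===== CLAIM (what is proved, stated in full; the proofs are below) =====
def Claim_equal_classify_collapse_component_py : Prop := ∀ (reason : String) (close_reason : String), Dom_classify_collapse_component_py reason close_reason → Spec_classify_collapse_component_py reason close_reason (classify_collapse_component_py reason close_reason)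

-- ===== LEMMAS AND PROOFS =====

-- The fold is insensitive to the traversal order (the step is left-commutative).
theorem pvStep_lcomm (text : String) :
    ∀ (b : Nat) (p q : String × Nat), pvStep text (pvStep text b p) q = pvStep text (pvStep text b q) p := by
  intro b p q
  unfold pvStep
  split_ifs <;> omega


-- A's table, grouped by priority (A's branch order).
def pvGrouped : List (String × Nat) :=
  ((["spread", "slippage", "friction", "too wide"]).map (·, 0)) ++
  ((["stale", "zombie", "recycle", "aged", "wish_distance"]).map (·, 1)) ++
  ((["acceptance_above_entry", "accept", "body break", "structure", "shelf broke"]).map (·, 2)) ++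
  ((["m1_pulse_flip", "no_first_confirmation", "no_reclaim", "shelf_fail",
     "no_rebuy", "failed_break", "failed_floor", "retest", "reclaim"]).map (·, 3)) ++
  ((["stop_loss_order"]).map (·, 4)) ++ ((["market_order_trade_close"]).map (·, 5))

theorem pvPerm : pvTokenPriority.Perm pvGrouped := by decide

-- Folding one priority group: result = min with the priority iff some token of the group matches.
theorem pvFold_group (text : String) (k : Nat) :
    ∀ (toks : List String) (acc : Nat),
      (toks.map (·, k)).foldl (pvStep text) acc =
        if toks.any (fun token => PySem.Str.isIn token text) then min acc k else acc := by
  intro toks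
  induction toks with
  | nil => intro acc; simp
  | cons t ts ih =>
    intro acc
    rw [List.map_cons, List.foldl_cons, ih, List.any_cons]
    simp only [pvStep]
    cases hb : PySem.Str.isIn t text <;>
      cases hb2 : (ts.any fun token => PySem.Str.isIn token text) <;>
        simp only [Bool.or_false, Bool.or_true, Bool.false_eq_true,
          if_false, ite_true] <;> omega

-- ===== VERDICT (by name: the statement is the Claim_ definition above) =====
theorem classify_collapse_component_py_spec : Claim_equal_classify_collapse_component_py := by
  intro reason close_reason _
  unfold Spec_classify_collapse_component_py
  simp only [classify_collapse_component_py, classify_collapse_component_py_alt]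
  generalize PySem.Str.lower (PySem.Str.join " "
    [(if reason = "" then "" else reason), (if close_reason = "" then "" else close_reason)]) = text
  rw [pvPerm.foldl_eq' (fun x _ y _ z => pvStep_lcomm text z x y)]
  simp only [pvGrouped, List.foldl_append, pvFold_group]
  rw [show (["stop_loss_order"]).any (fun token => PySem.Str.isIn token text)
        = PySem.Str.isIn "stop_loss_order" text from by simp]
  rw [show (["market_order_trade_close"]).any (fun token => PySem.Str.isIn token text)
        = PySem.Str.isIn "market_order_trade_close" text from by simp]
  generalize (["spread", "slippage", "friction", "too wide"]).any (fun token => PySem.Str.isIn token text) = b0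
  generalize (["stale", "zombie", "recycle", "aged", "wish_distance"]).any (fun token => PySem.Str.isIn token text) = b1
  generalize (["acceptance_above_entry", "accept", "body break", "structure", "shelf broke"]).any (fun token => PySem.Str.isIn token text) = b2
  generalize (["m1_pulse_flip", "no_first_confirmation", "no_reclaim", "shelf_fail",
               "no_rebuy", "failed_break", "failed_floor", "retest", "reclaim"]).any (fun token => PySem.Str.isIn token text) = b3
  generalize PySem.Str.isIn "stop_loss_order" text = b4
  generalize PySem.Str.isIn "market_order_trade_close" text = b5
  cases b0 <;> cases b1 <;> cases b2 <;> cases b3 <;> cases b4 <;> cases b5 <;> rfl
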